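-- pv_equiv track=rewrite | github.com/Davolkoff/new_level_bot | user_data_checker.py | is_full_name
-- ===== SOURCE A (Python) =====
-- def is_full_name(full_name):
--     if full_name.count(" ") == 2:
--         name = full_name.split(" ")
--         for word in name:
--             for i in word:
--                 if not i.isalpha():
--                     return False
--         return True
--     else:
--         return False
-- ===== SOURCE B (Python) =====
-- def is_full_name(full_name):
--     spaces = 0
--     for c in full_name:
--         if c == " ":
--             spaces += 1
--         elif not c.isalpha():
--             return False
--     return spaces == 2
-- ===== Notes on version B (the rewrite author's own statement) =====
-- stated objective: simpler
-- what changed: Replaces A's staged passes (count the spaces, split into words, nested per-word/per-char loops) with one fused scan that keeps a running space counter, rejects any non-alpha non-space character immediately, and compares the counter to 2 only at the end.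
import Mathlib
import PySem

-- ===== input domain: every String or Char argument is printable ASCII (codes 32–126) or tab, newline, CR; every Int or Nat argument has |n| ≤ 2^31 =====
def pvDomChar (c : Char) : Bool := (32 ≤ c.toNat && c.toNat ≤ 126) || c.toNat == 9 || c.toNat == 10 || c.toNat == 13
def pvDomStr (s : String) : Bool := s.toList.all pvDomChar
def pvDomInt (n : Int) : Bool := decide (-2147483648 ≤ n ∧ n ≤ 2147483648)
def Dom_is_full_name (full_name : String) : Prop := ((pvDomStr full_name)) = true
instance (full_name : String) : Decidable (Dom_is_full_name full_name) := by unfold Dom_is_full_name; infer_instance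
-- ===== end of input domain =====

-- B replaces A's staged passes (count spaces, split, nested per-word/per-char loops) with one
-- fused scan keeping a running space counter with early rejection (simpler decomposition).
-- ===== PORT A =====
def is_full_name (full_name : String) : Bool :=
  if PySem.Str.count full_name " " == 2 then
    -- name = full_name.split(" "); sep is nonempty so split? is `some`
    let name := (PySem.Str.split? full_name " ").getD []
    -- for word in name: for i in word: if not i.isalpha(): return False / return True
    name.all (fun word => word.toList.all (fun i => PySem.Chars.isalpha i))
  else
    false

-- ===== PORT B =====
-- the for-loop of Source B: scan the characters, counting spaces, early-False on anything else
def is_full_name_alt.go : List Char → Nat → Bool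
  | [], spaces => spaces == 2
  | c :: rest, spaces =>
    if c == ' ' then is_full_name_alt.go rest (spaces + 1)
    else if PySem.Chars.isalpha c then is_full_name_alt.go rest spaces
    else false

def is_full_name_alt (full_name : String) : Bool :=
  is_full_name_alt.go full_name.toList 0

-- ===== PRECONDITION & SPEC =====
def Spec_is_full_name (full_name : String) (out : Bool) : Prop := out = is_full_name_alt full_name
instance (full_name : String) (out : Bool) : Decidable (Spec_is_full_name full_name out) := by unfold Spec_is_full_name; infer_instance

-- ===== CLAIM (what is proved, stated in full; the proofs are below) =====
def Claim_equal_is_full_name : Prop := ∀ (full_name : String), Dom_is_full_name full_name → Spec_is_full_name full_name (is_full_name full_name)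

-- ===== LEMMAS AND PROOFS =====

-- B's loop computes: every char alphabetic-or-space, and spaces-so-far plus remaining spaces = 2.
theorem go_characterization (l : List Char) : ∀ (s : Nat),
    is_full_name_alt.go l s
      = (l.all (fun c => PySem.Chars.isalpha c || c == ' ') && (s + l.count ' ' == 2)) := by
  induction l with
  | nil => intro s; simp [is_full_name_alt.go]
  | cons c rest ih =>
    intro s
    by_cases hc : c = ' '
    · subst hc
      have harith : s + 1 + rest.count ' ' = s + (rest.count ' ' + 1) := by omega
      simp [is_full_name_alt.go, ih, harith]
    · have hc' : (c == ' ') = false := by simpa using hc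
      by_cases ha : PySem.Chars.isalpha c
      · simp [is_full_name_alt.go, hc', ha, ih, List.count_cons]
      · simp [is_full_name_alt.go, hc', ha]

-- str.count on the single-char pattern " " is the number of ' ' characters.
theorem count_go_space (fuel : Nat) : ∀ (l : List Char) (acc : Nat),
    l.length ≤ fuel →
    PySem.Chars.count.go [' '] fuel l acc = acc + l.count ' ' := by
  induction fuel with
  | zero =>
    intro l acc h
    have : l = [] := List.eq_nil_of_length_eq_zero (Nat.le_zero.mp h)
    subst this; simp [PySem.Chars.count.go]
  | succ n ih =>
    intro l acc h
    cases l with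
    | nil => simp [PySem.Chars.count.go]
    | cons c rest =>
      by_cases hc : c = ' '
      · subst hc
        rw [show PySem.Chars.count.go [' '] (n+1) (' '::rest) acc
              = PySem.Chars.count.go [' '] n rest (acc + 1) by
            simp [PySem.Chars.count.go, List.isPrefixOf]]
        rw [ih rest _ (by simpa using Nat.lt_succ_iff.mp (by simpa using h))]
        simp
        omega
      · rw [show PySem.Chars.count.go [' '] (n+1) (c::rest) acc
              = PySem.Chars.count.go [' '] n rest acc by
            simp [PySem.Chars.count.go, List.isPrefixOf, Ne.symm hc]]
        rw [ih rest _ (by simpa using Nat.lt_succ_iff.mp (by simpa using h))]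
        have hc' : (c == ' ') = false := by simpa using hc
        simp [List.count_cons, hc']

theorem count_space (cs : List Char) :
    PySem.Chars.count cs [' '] = cs.count ' ' := by
  unfold PySem.Chars.count
  simpa using count_go_space cs.length cs 0 (Nat.le_refl _)

-- Invariant of splitOn.go for the single-char separator ' ': "every produced word is fully
-- alphabetic" equals "accumulated words alphabetic, current word alphabetic, and every
-- remaining character alphabetic-or-space".
theorem splitOn_go_all_alpha (fuel : Nat) : ∀ (l cur : List Char) (acc : List (List Char)),
    l.length ≤ fuel →
    (PySem.Chars.splitOn.go [' '] fuel l cur acc).all (fun w => w.all PySem.Chars.isalpha)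
      = (acc.all (fun w => w.all PySem.Chars.isalpha) && cur.all PySem.Chars.isalpha
          && l.all (fun c => PySem.Chars.isalpha c || c == ' ')) := by
  induction fuel with
  | zero =>
    intro l cur acc h
    have : l = [] := List.eq_nil_of_length_eq_zero (Nat.le_zero.mp h)
    subst this
    simp [PySem.Chars.splitOn.go, List.all_reverse, Bool.and_comm]
  | succ n ih =>
    intro l cur acc h
    cases l with
    | nil => simp [PySem.Chars.splitOn.go, List.all_reverse, Bool.and_comm]
    | cons c rest =>
      by_cases hc : c = ' '
      · subst hc
        rw [show PySem.Chars.splitOn.go [' '] (n+1) (' '::rest) cur acc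
              = PySem.Chars.splitOn.go [' '] n rest [] (cur.reverse :: acc) by
            simp [PySem.Chars.splitOn.go, List.isPrefixOf]]
        rw [ih rest [] _ (by simpa using Nat.lt_succ_iff.mp (by simpa using h))]
        simp [List.all_reverse, Bool.and_comm, Bool.and_left_comm]
      · rw [show PySem.Chars.splitOn.go [' '] (n+1) (c::rest) cur acc
              = PySem.Chars.splitOn.go [' '] n rest (c::cur) acc by
            simp [PySem.Chars.splitOn.go, List.isPrefixOf, Ne.symm hc]]
        rw [ih rest (c::cur) acc (by simpa using Nat.lt_succ_iff.mp (by simpa using h))]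
        have hc' : (c == ' ') = false := by simpa using hc
        simp [hc']
        ac_rfl

-- Splitting on ' ' and checking every word is alphabetic = every char is alphabetic or a space.
theorem splitOn_space_all_alpha (cs : List Char) :
    (PySem.Chars.splitOn cs [' ']).all (fun w => w.all PySem.Chars.isalpha)
      = cs.all (fun c => PySem.Chars.isalpha c || c == ' ') := by
  unfold PySem.Chars.splitOn
  rw [splitOn_go_all_alpha (cs.length + 1) cs [] [] (Nat.le_succ _)]
  simp

-- ===== VERDICT (by name: the statement is the Claim_ definition above) =====
theorem is_full_name_spec : Claim_equal_is_full_name := by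
  intro s _
  unfold Spec_is_full_name is_full_name is_full_name_alt
  rw [go_characterization]
  have hcnt : PySem.Str.count s " " = s.toList.count ' ' := by
    have := count_space s.toList
    simpa [PySem.Str.count] using this
  rw [hcnt]
  by_cases h : s.toList.count ' ' = 2
  · simp only [h, beq_self_eq_true, if_true]
    have hs : PySem.Str.split? s " " = some ((PySem.Chars.splitOn s.toList [' ']).map String.ofList) := rfl
    rw [hs]
    simp [List.all_map, Function.comp_def, splitOn_space_all_alpha]
  · have h' : (s.toList.count ' ' == 2) = false := by simpa using h
    simp [h']
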